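-- pv_equiv track=rewrite | github.com/stevenmburns/adventofcode | 2019/22/test_A.py | exe
-- ===== SOURCE A (Python) =====
-- def exe( deck, cmd):
--     if cmd[0] == 'new':
--         new_deck = deck[:]
--         new_deck.reverse()
--         return new_deck
--     elif cmd[0] == 'cut':
--         k = cmd[1]
--         new_deck = deck[k:] + deck[:k]
--         return new_deck
--     elif cmd[0] == 'incr':
--         k = cmd[1]
--         assert 1 == extended_euclid( k, len(deck))[0]
--
--         new_deck = [None]*len(deck)
--         i = 0
--         for x in deck:
--             new_deck[i] = x
--             i = (i + k) % len(deck)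
--
--         return new_deck
--     else:
--         assert False, cmd
--
-- def extended_euclid( a, b):
--     if a == 0:
--         return b, 0, 1
--     d, x1, y1 = extended_euclid( b%a, a)
--     return d, y1 - (b // a) * x1, x1
-- ===== SOURCE B (Python) =====
-- def extended_euclid(a, b):
--     if a == 0:
--         return b, 0, 1
--     d, x1, y1 = extended_euclid(b % a, a)
--     return d, y1 - (b // a) * x1, x1
--
-- def exe(deck, cmd):
--     if cmd[0] == 'new':
--         return deck[::-1]
--     if cmd[0] == 'cut':
--         k = cmd[1]
--         return deck[k:] + deck[:k]
--     assert cmd[0] == 'incr', cmd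
--     k = cmd[1]
--     n = len(deck)
--     g, kinv, _ = extended_euclid(k, n)
--     assert g == 1
--     # gather: output slot j pulls the card from source index j * k^{-1} mod n
--     return [deck[(j * kinv) % n] for j in range(n)]
-- ===== Notes on version B (the rewrite author's own statement) =====
-- stated objective: alternative
-- what changed: The 'incr' branch is replaced by a gather: instead of scattering each card to an accumulated target position i=(i+k)%n, B computes the modular inverse of k from extended_euclid's Bezout coefficient and builds the new deck by pulling, for each output slot j, the card deck[(j*kinv)%n].
import Mathlib
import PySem

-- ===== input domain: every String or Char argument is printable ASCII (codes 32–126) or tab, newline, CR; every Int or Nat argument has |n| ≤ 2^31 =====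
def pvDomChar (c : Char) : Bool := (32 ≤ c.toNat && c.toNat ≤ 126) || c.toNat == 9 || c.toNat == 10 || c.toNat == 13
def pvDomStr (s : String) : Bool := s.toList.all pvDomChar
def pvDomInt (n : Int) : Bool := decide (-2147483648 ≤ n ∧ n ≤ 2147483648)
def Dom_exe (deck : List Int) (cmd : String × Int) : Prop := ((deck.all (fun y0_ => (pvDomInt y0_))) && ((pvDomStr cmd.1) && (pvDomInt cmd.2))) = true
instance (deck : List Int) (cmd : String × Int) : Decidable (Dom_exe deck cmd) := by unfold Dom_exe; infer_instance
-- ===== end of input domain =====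

-- B replaces A's scatter loop for 'incr' by a modular-inverse gather; same cost, different algorithm.

-- B replaces A's scatter loop for 'incr' ('place deck[t] at position (t*k) % n') by a
-- gather using the modular inverse of k obtained from extended_euclid's Bezout coefficient.

-- ===== PORT A =====
-- shared module helper: extended_euclid(a, b) (recursive; Python // and %)
def extendedEuclid (a b : Int) : Int × Int × Int :=
  if _h : a = 0 then (b, 0, 1)
  else
    let r := extendedEuclid (PySem.Int.mod b a) a
    (r.1, r.2.2 - (PySem.Int.floordiv b a) * r.2.1, r.2.1)
termination_by a.natAbs
decreasing_by
  rcases lt_trichotomy a 0 with hlt | hz | hgt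
  · have h1 := PySem.Int.mod_neg_bounds b hlt
    omega
  · exact absurd hz _h
  · have h1 := PySem.Int.mod_nonneg b hgt
    have h2 := PySem.Int.mod_lt b hgt
    omega


def exe (deck : List Int) (cmd : String × Int) : List Int :=
  if cmd.1 = "new" then
    deck.reverse                      -- deck[:] then .reverse()
  else if cmd.1 = "cut" then
    PySem.List.slice deck (some cmd.2) none ++ PySem.List.slice deck none (some cmd.2)
  else if cmd.1 = "incr" then
    let k := cmd.2
    -- assert 1 == extended_euclid(k, len(deck))[0] : raises exactly outside Pre_exe
    let n : Int := deck.length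
    -- [None]*n modelled as replicate n 0: under Pre_exe every slot is overwritten by the loop
    let st := deck.foldl
      (fun (st : List Int × Int) x =>
        (PySem.List.pySetD st.1 st.2 x, PySem.Int.mod (st.2 + k) n))
      (List.replicate deck.length 0, 0)
    st.1
  else
    []                                -- assert False: raises, outside Pre_exe

-- ===== PORT B =====
def exe_alt (deck : List Int) (cmd : String × Int) : List Int :=
  if cmd.1 = "new" then
    (PySem.List.slice? deck none none (-1)).getD []   -- deck[::-1] (step -1 ≠ 0: always some)
  else if cmd.1 = "cut" then
    PySem.List.slice deck (some cmd.2) none ++ PySem.List.slice deck none (some cmd.2)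
  else if cmd.1 = "incr" then
    -- assert cmd[0] == 'incr' and assert g == 1 raise exactly outside Pre_exe
    let k := cmd.2
    let n : Int := deck.length
    let r := extendedEuclid k n
    -- deck[(j*kinv) % n]: this index lies in [0, n), so pyGetD with default 0 is exact
    (PySem.List.pyRange 0 n 1).map
      (fun j => PySem.List.pyGetD deck (PySem.Int.mod (j * r.2.1) n) 0)
  else
    []                                -- assert cmd[0] == 'incr' fails: raises, outside Pre_exe

-- ===== PRECONDITION & SPEC =====
-- Pre_exe is exactly where A returns: a known command and, for 'incr', a nonnegative k
-- coprime to len(deck) (extended_euclid(k, n)[0] = 1 iff 0 ≤ k and gcd(k, n) = 1;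
-- on every other input A's assert raises AssertionError).
def Pre_exe (deck : List Int) (cmd : String × Int) : Prop :=
  cmd.1 = "new" ∨ cmd.1 = "cut" ∨
    (cmd.1 = "incr" ∧ 0 ≤ cmd.2 ∧ Int.gcd cmd.2 (deck.length : Int) = 1)
instance (deck : List Int) (cmd : String × Int) : Decidable (Pre_exe deck cmd) := by
  unfold Pre_exe; infer_instance

def pvWitness_exe : List Int × (String × Int) := ([3, 1, 4, 1, 5, 9, 2], ("incr", 3))

def Spec_exe (deck : List Int) (cmd : String × Int) (out : List Int) : Prop := out = exe_alt deck cmd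
instance (deck : List Int) (cmd : String × Int) (out : List Int) : Decidable (Spec_exe deck cmd out) := by unfold Spec_exe; infer_instance

-- ===== CLAIM (what is proved, stated in full; the proofs are below) =====
def Claim_equal_exe : Prop := ∀ (deck : List Int) (cmd : String × Int), Dom_exe deck cmd → Pre_exe deck cmd → Spec_exe deck cmd (exe deck cmd)

-- ===== LEMMAS AND PROOFS =====

theorem gcd_step (a b : Int) : Int.gcd (b % a) a = Int.gcd b a := by
  rw [Int.emod_def]
  simp [Int.gcd_comm]


theorem ee_correct (a b : Int) : 0 ≤ a → 0 ≤ b →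
    (extendedEuclid a b).1 = (Int.gcd a b : Int) ∧
    a * (extendedEuclid a b).2.1 + b * (extendedEuclid a b).2.2 = (extendedEuclid a b).1 := by
  fun_induction extendedEuclid a b with
  | case1 b =>
    intro ha hb
    refine ⟨by simp [Int.gcd, Int.natAbs_of_nonneg hb], by simp⟩
  | case2 a b h r IH =>
    intro ha hb
    have ha' : 0 < a := lt_of_le_of_ne ha (Ne.symm h)
    have hm0 : 0 ≤ PySem.Int.mod b a := PySem.Int.mod_nonneg b ha'
    obtain ⟨IH1, IH2⟩ := IH hm0 ha
    rw [PySem.Int.mod_eq_emod_of_pos ha'] at IH1 IH2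
    rw [PySem.Int.floordiv_eq_ediv_of_pos ha']
    have hr : r = extendedEuclid (b % a) a := by
      show extendedEuclid (PySem.Int.mod b a) a = _
      rw [PySem.Int.mod_eq_emod_of_pos ha']
    constructor
    · show r.1 = _
      rw [hr, IH1, gcd_step, Int.gcd_comm]
    · show a * (r.2.2 - b / a * r.2.1) + b * r.2.1 = r.1
      rw [hr]
      linear_combination IH2 - (extendedEuclid (b % a) a).2.1 * Int.emod_def b a


theorem getD_eq_getElem' (l : List Int) (i : Nat) (h : i < l.length) : l.getD i 0 = l[i] := by
  simp [List.getD_eq_getElem?_getD, List.getElem?_eq_getElem h]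


theorem scatter_loop (D : List Int) (k : Int)
    (hn : 0 < D.length)
    (hinj : ∀ t s : Nat, t < D.length → s < D.length →
      PySem.Int.mod (t * k) (D.length : Int) = PySem.Int.mod (s * k) (D.length : Int) → t = s)
    (l : List Int) (m : Nat) (arr : List Int)
    (hl : D.drop m = l) (hm : m ≤ D.length)
    (hlen : arr.length = D.length)
    (hprev : ∀ t : Nat, t < m →
      arr.getD (PySem.Int.mod (t * k) (D.length : Int)).toNat 0 = D.getD t 0) :
    (l.foldl
      (fun (st : List Int × Int) x =>
        (PySem.List.pySetD st.1 st.2 x, PySem.Int.mod (st.2 + k) (D.length : Int)))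
      (arr, PySem.Int.mod (m * k) (D.length : Int))).1.length = D.length ∧
    ∀ t : Nat, t < D.length →
      (l.foldl
        (fun (st : List Int × Int) x =>
          (PySem.List.pySetD st.1 st.2 x, PySem.Int.mod (st.2 + k) (D.length : Int)))
        (arr, PySem.Int.mod (m * k) (D.length : Int))).1.getD
          (PySem.Int.mod (t * k) (D.length : Int)).toNat 0 = D.getD t 0 := by
  induction l generalizing m arr with
  | nil =>
    have hm' : m = D.length := by
      have := List.drop_eq_nil_iff.mp hl
      omega
    exact ⟨hlen, fun t ht => hprev t (by omega)⟩
  | cons x l' IH =>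
    have hNpos : (0 : Int) < (D.length : Int) := by exact_mod_cast hn
    have hmlt : m < D.length := by
      by_contra hc
      rw [List.drop_eq_nil_iff.mpr (by omega)] at hl
      simp at hl
    have hx : x = D[m] := by
      have h0 : (D.drop m)[0]? = D[m]? := by
        simp [List.getElem?_drop]
      rw [hl] at h0
      simp [List.getElem?_eq_getElem hmlt] at h0
      exact h0
    have hl' : D.drop (m + 1) = l' := by
      rw [← List.drop_drop (i := 1) (j := m), hl]
      rfl
    have hposm0 : 0 ≤ PySem.Int.mod ((m : Int) * k) (D.length : Int) :=
      PySem.Int.mod_nonneg _ hNpos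
    have hposmlt : PySem.Int.mod ((m : Int) * k) (D.length : Int) < (D.length : Int) :=
      PySem.Int.mod_lt _ hNpos
    have hstep : PySem.Int.mod (PySem.Int.mod ((m : Int) * k) (D.length : Int) + k) (D.length : Int)
        = PySem.Int.mod (((m : Nat) + 1 : Nat) * k) (D.length : Int) := by
      rw [PySem.Int.mod_eq_emod_of_pos hNpos, PySem.Int.mod_eq_emod_of_pos hNpos,
          PySem.Int.mod_eq_emod_of_pos hNpos, Int.emod_add_emod]
      congr 1
      push_cast
      ring
    have hset : PySem.List.pySetD arr (PySem.Int.mod ((m : Int) * k) (D.length : Int)) x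
        = arr.set (PySem.Int.mod ((m : Int) * k) (D.length : Int)).toNat x :=
      PySem.List.pySetD_of_nonneg arr x hposm0
    have hidx : (PySem.Int.mod ((m : Int) * k) (D.length : Int)).toNat < arr.length := by
      omega
    have hprev' : ∀ t : Nat, t < m + 1 →
        (arr.set (PySem.Int.mod ((m : Int) * k) (D.length : Int)).toNat x).getD
          (PySem.Int.mod ((t : Int) * k) (D.length : Int)).toNat 0 = D.getD t 0 := by
      intro t ht
      rcases Nat.lt_or_ge t m with htm | htm
      · have hne : (PySem.Int.mod ((t : Int) * k) (D.length : Int)).toNat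
            ≠ (PySem.Int.mod ((m : Int) * k) (D.length : Int)).toNat := by
          intro hc
          have ht0 : 0 ≤ PySem.Int.mod ((t : Int) * k) (D.length : Int) :=
            PySem.Int.mod_nonneg _ hNpos
          have : PySem.Int.mod ((t : Int) * k) (D.length : Int)
              = PySem.Int.mod ((m : Int) * k) (D.length : Int) := by omega
          have := hinj t m (by omega) hmlt this
          omega
        have htlt : (PySem.Int.mod ((t : Int) * k) (D.length : Int)).toNat < arr.length := by
          have := PySem.Int.mod_lt ((t : Int) * k) hNpos
          have := PySem.Int.mod_nonneg ((t : Int) * k) hNpos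
          omega
        rw [getD_eq_getElem' _ _ (by simpa using htlt)]
        rw [List.getElem_set_ne (by omega)]
        rw [← getD_eq_getElem' _ _ htlt]
        exact hprev t htm
      · have htm' : t = m := by omega
        subst htm'
        rw [getD_eq_getElem' _ _ (by simpa using hidx)]
        rw [List.getElem_set_self (by simpa using hidx)]
        rw [hx, getD_eq_getElem' _ _ hmlt]
    have := IH (m + 1) (arr.set (PySem.Int.mod ((m : Int) * k) (D.length : Int)).toNat x)
      hl' (by omega) (by simpa using hlen) (by exact_mod_cast hprev')
    simp only [List.foldl_cons, hset, hstep]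
    convert this using 3


theorem exe_incr (deck : List Int) (k : Int) (hk : 0 ≤ k)
    (hg : Int.gcd k (deck.length : Int) = 1) :
    exe deck ("incr", k) = exe_alt deck ("incr", k) := by
  rcases deck with _ | ⟨d0, drest⟩
  · simp [exe, exe_alt, PySem.List.pyRange]
  set D := d0 :: drest with hD
  have hn : 0 < D.length := by simp [hD]
  have hNpos : (0 : Int) < (D.length : Int) := by exact_mod_cast hn
  have hee := ee_correct k (D.length : Int) hk (le_of_lt hNpos)
  set x := (extendedEuclid k (D.length : Int)).2.1 with hx
  set y := (extendedEuclid k (D.length : Int)).2.2 with hy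
  have h1 : (extendedEuclid k (D.length : Int)).1 = 1 := by
    rw [hee.1, hg]; rfl
  have hbez : k * x + (D.length : Int) * y = 1 := by
    rw [← h1]; exact hee.2
  have hcop : IsCoprime ((D.length : Int)) k := by
    rw [Int.isCoprime_iff_gcd_eq_one, Int.gcd_comm]; exact hg
  have hinj : ∀ t s : Nat, t < D.length → s < D.length →
      PySem.Int.mod (t * k) (D.length : Int) = PySem.Int.mod (s * k) (D.length : Int) → t = s := by
    intro t s ht hs hts
    rw [PySem.Int.mod_eq_emod_of_pos hNpos, PySem.Int.mod_eq_emod_of_pos hNpos] at hts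
    have hdvd : (D.length : Int) ∣ ((t : Int) - s) * k := by
      have := Int.emod_emod_of_dvd ((t : Int) * k) (dvd_refl (D.length : Int))
      have h2 : ((t : Int) * k - (s : Int) * k) % (D.length : Int) = 0 := by
        rw [Int.sub_emod, hts]; simp
      have h3 := Int.dvd_of_emod_eq_zero h2
      have h4 : (t : Int) * k - (s : Int) * k = ((t : Int) - s) * k := by ring
      rwa [h4] at h3
    have hdvd2 : (D.length : Int) ∣ ((t : Int) - s) := hcop.dvd_of_dvd_mul_right hdvd
    obtain ⟨c, hc⟩ := hdvd2
    have hbound : -(D.length : Int) < (t : Int) - s ∧ (t : Int) - s < (D.length : Int) := by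
      constructor <;> omega
    have hc0 : c = 0 := by nlinarith [hbound.1, hbound.2]
    rw [hc0, mul_zero] at hc
    omega
  have hinit : (0 : Int) = PySem.Int.mod (((0 : Nat) : Int) * k) (D.length : Int) := by
    rw [PySem.Int.mod_eq_emod_of_pos hNpos]
    simp
  have hloop := scatter_loop D k hn hinj D 0 (List.replicate D.length 0) rfl (by omega)
    (by simp) (by omega)
  rw [← hinit] at hloop
  have hA : exe D ("incr", k) = (D.foldl
      (fun (st : List Int × Int) x =>
        (PySem.List.pySetD st.1 st.2 x, PySem.Int.mod (st.2 + k) (D.length : Int)))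
      (List.replicate D.length 0, 0)).1 := by
    simp only [exe]
    rw [if_neg (by decide), if_neg (by decide), if_pos trivial]
  have hB : exe_alt D ("incr", k) = (List.range D.length).map
      (fun j : Nat => PySem.List.pyGetD D (PySem.Int.mod ((j : Int) * x) (D.length : Int)) 0) := by
    simp only [exe_alt]
    rw [if_neg (by decide), if_neg (by decide), if_pos trivial]
    rw [PySem.List.pyRange_one]
    simp [List.map_map, Function.comp]
    intro a _
    rw [← hx]
  rw [hA, hB]
  apply List.ext_getElem
  · rw [hloop.1]; simp
  intro j hj hj2
  have hjn : j < D.length := hloop.1 ▸ hj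
  have hjd0 : 0 ≤ ((j : Int) * x) % (D.length : Int) := Int.emod_nonneg _ (by omega)
  have hjdlt : ((j : Int) * x) % (D.length : Int) < (D.length : Int) := Int.emod_lt_of_pos _ hNpos
  set t : Nat := (((j : Int) * x) % (D.length : Int)).toNat with htdef
  have htn : t < D.length := by omega
  have htc : (t : Int) = ((j : Int) * x) % (D.length : Int) := by omega
  have hpos : PySem.Int.mod ((t : Int) * k) (D.length : Int) = (j : Int) := by
    rw [PySem.Int.mod_eq_emod_of_pos hNpos, htc]
    calc ((j : Int) * x % (D.length : Int) * k) % (D.length : Int)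
        = ((j : Int) * x * k) % (D.length : Int) := by
          rw [Int.mul_emod ((j : Int) * x % (D.length : Int)) k,
            Int.emod_emod_of_dvd _ (dvd_refl _), ← Int.mul_emod]
      _ = ((j : Int) + (D.length : Int) * ((j : Int) * (-y))) % (D.length : Int) := by
          congr 1
          linear_combination (j : Int) * hbez
      _ = (j : Int) % (D.length : Int) := by
          rw [Int.add_mul_emod_self_left]
      _ = (j : Int) := Int.emod_eq_of_lt (by omega) (by exact_mod_cast hjn)
  have hval := hloop.2 t htn
  rw [hpos] at hval
  have hgl : (D.foldl
      (fun (st : List Int × Int) x =>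
        (PySem.List.pySetD st.1 st.2 x, PySem.Int.mod (st.2 + k) (D.length : Int)))
      (List.replicate D.length 0, 0)).1.getD j 0 = D.getD t 0 := by
    simpa using hval
  rw [getD_eq_getElem' _ _ hj, getD_eq_getElem' _ _ (by omega)] at hgl
  rw [hgl]
  rw [List.getElem_map]
  simp only [List.getElem_range]
  rw [PySem.List.pyGetD_eq_getElem _ _ (by
      rw [PySem.Int.mod_eq_emod_of_pos hNpos]; exact hjd0) (by
      rw [PySem.Int.mod_eq_emod_of_pos hNpos]; exact hjdlt)]
  congr 1
  rw [PySem.Int.mod_eq_emod_of_pos hNpos]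

-- ===== VERDICT (by name: the statement is the Claim_ definition above) =====
theorem exe_spec : Claim_equal_exe := by
  intro deck cmd _hdom hpre
  unfold Spec_exe
  rcases hpre with h | h | ⟨h, hk, hg⟩
  · simp [exe, exe_alt, h, PySem.List.slice?_none_none_neg_one]
  · simp [exe, exe_alt, h]
  · have hcmd : cmd = ("incr", cmd.2) := by
      cases cmd; simp_all
    rw [hcmd]
    exact exe_incr deck cmd.2 hk hg
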